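-- pv_equiv track=rewrite | github.com/SamSof28/calculadora-modular | calculadora.py | cuadrados_perfectos
-- ===== SOURCE A (Python) =====
-- def validar_modulo(n: int):
--     if n <= 1:
--         raise ValueError("El módulo n debe ser mayor que 1.")
--     return True
--
-- def cuadrados_perfectos(n: int) -> list[int]:
--     validar_modulo(n)
--     cuadrados = []
--
--     for r in range(n):
--         cuadrado = (r * r) % n
--
--         if cuadrado not in cuadrados:
--             cuadrados.append(cuadrado)
--
--     return sorted(cuadrados)
-- ===== SOURCE B (Python) =====
-- def validar_modulo(n: int):
--     if n <= 1:
--         raise ValueError("El módulo n debe ser mayor que 1.")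
--     return True
--
-- def cuadrados_perfectos(n: int) -> list[int]:
--     # Half-range set comprehension ((n-r)^2 = r^2 mod n), then an ordered
--     # membership sweep over range(n) instead of sorting.
--     validar_modulo(n)
--     residuos = {(r * r) % n for r in range(n // 2 + 1)}
--     return [i for i in range(n) if i in residuos]
-- ===== Notes on version B (the rewrite author's own statement) =====
-- stated objective: faster
-- what changed: B builds the residue set from only r in [0, n//2] (symmetry (n-r)^2 = r^2 mod n) via a set comprehension and produces the sorted output by sweeping range(n) with an O(1) membership test, replacing A's full-range loop with an O(k) list membership scan per step followed by a sort.
import Mathlib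
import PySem

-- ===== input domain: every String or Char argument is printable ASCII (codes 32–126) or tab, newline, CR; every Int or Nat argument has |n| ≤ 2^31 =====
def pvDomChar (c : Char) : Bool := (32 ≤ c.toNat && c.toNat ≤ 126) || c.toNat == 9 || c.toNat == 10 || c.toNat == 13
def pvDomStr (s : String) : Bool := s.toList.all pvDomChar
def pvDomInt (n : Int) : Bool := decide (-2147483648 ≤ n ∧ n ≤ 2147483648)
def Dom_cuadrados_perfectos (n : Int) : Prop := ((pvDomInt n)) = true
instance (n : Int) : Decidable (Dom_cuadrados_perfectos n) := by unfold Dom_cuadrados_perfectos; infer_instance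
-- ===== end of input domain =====

-- B builds the residue set from the half range [0, n//2] only (symmetry (n-r)^2 ≡ r^2 mod n)
-- and emits the sorted result by an ordered membership sweep over range(n), with no sort call.

-- ===== PORT A =====
-- for r in range(n): c = (r*r) % n; if c not in cuadrados: cuadrados.append(c); return sorted(cuadrados)
def cuadrados_perfectos (n : Int) : List Int :=
  let cuadrados := (PySem.List.pyRange 0 n 1).foldl
    (fun acc r =>
      let cuadrado := PySem.Int.mod (r * r) n
      if cuadrado ∈ acc then acc else acc ++ [cuadrado]) []
  PySem.List.sorted cuadrados (fun x => x) false

-- ===== PORT B =====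
-- residuos = {(r*r) % n for r in range(n//2 + 1)}; return [i for i in range(n) if i in residuos]
def cuadrados_perfectos_alt (n : Int) : List Int :=
  let residuos : PySem.Set Int :=
    PySem.Set.ofList ((PySem.List.pyRange 0 (PySem.Int.floordiv n 2 + 1) 1).map
      (fun r => PySem.Int.mod (r * r) n))
  (PySem.List.pyRange 0 n 1).filter (fun i => PySem.Set.contains residuos i)

-- ===== PRECONDITION & SPEC =====
-- validar_modulo raises ValueError for n ≤ 1, so Pre_ is exactly n ≥ 2.
def Pre_cuadrados_perfectos (n : Int) : Prop := 2 ≤ n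
instance (n : Int) : Decidable (Pre_cuadrados_perfectos n) := by unfold Pre_cuadrados_perfectos; infer_instance
def pvWitness_cuadrados_perfectos : Int := 7

def Spec_cuadrados_perfectos (n : Int) (out : List Int) : Prop := out = cuadrados_perfectos_alt n
instance (n : Int) (out : List Int) : Decidable (Spec_cuadrados_perfectos n out) := by unfold Spec_cuadrados_perfectos; infer_instance

-- ===== CLAIM =====
def Claim_equal_cuadrados_perfectos : Prop := ∀ (n : Int), Dom_cuadrados_perfectos n → Pre_cuadrados_perfectos n → Spec_cuadrados_perfectos n (cuadrados_perfectos n)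

-- ===== LEMMAS AND PROOFS =====

-- A's dedup loop is set(...) of the mapped range.
lemma aLoop_eq_ofList (n : Int) :
    (PySem.List.pyRange 0 n 1).foldl
      (fun acc r =>
        let cuadrado := PySem.Int.mod (r * r) n
        if cuadrado ∈ acc then acc else acc ++ [cuadrado]) [] =
    PySem.Set.ofList ((PySem.List.pyRange 0 n 1).map (fun r => PySem.Int.mod (r * r) n)) := by
  rw [PySem.Set.ofList_eq_foldl, List.foldl_map]
  refine PySem.List.foldl_congr_mem _ _ _ _ (fun acc r _ => ?_)
  simp [PySem.Set.add, PySem.Set.contains]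

-- the symmetry (n-r)^2 ≡ r^2 (mod n)
lemma sq_mod_symm (n r : Int) (h : 0 < n) :
    PySem.Int.mod ((n - r) * (n - r)) n = PySem.Int.mod (r * r) n := by
  rw [PySem.Int.mod_eq_emod_of_pos h, PySem.Int.mod_eq_emod_of_pos h]
  have : (n - r) * (n - r) = r * r + n * (n - 2 * r) := by ring
  rw [this, Int.add_mul_emod_self_left]

-- the full-range and half-range residue pools have the same elements
lemma mem_iff (n : Int) (hn : 2 ≤ n) (x : Int) :
    (x ∈ (PySem.List.pyRange 0 n 1).map (fun r => PySem.Int.mod (r * r) n)) ↔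
    (x ∈ (PySem.List.pyRange 0 (PySem.Int.floordiv n 2 + 1) 1).map
        (fun r => PySem.Int.mod (r * r) n)) := by
  have h2 : PySem.Int.floordiv n 2 = n / 2 := PySem.Int.floordiv_eq_ediv_of_pos (by omega)
  simp only [List.mem_map, PySem.List.mem_pyRange_one, h2]
  constructor
  · rintro ⟨r, ⟨hr0, hrn⟩, hrx⟩
    by_cases hle : r ≤ n / 2
    · exact ⟨r, by omega, hrx⟩
    · refine ⟨n - r, by omega, ?_⟩
      rw [sq_mod_symm n r (by omega)]
      exact hrx
  · rintro ⟨r, ⟨hr0, hrh⟩, hrx⟩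
    exact ⟨r, by omega, hrx⟩

-- every residue lies in [0, n)
lemma mod_mem_range (n r : Int) (hn : 0 < n) :
    0 ≤ PySem.Int.mod (r * r) n ∧ PySem.Int.mod (r * r) n < n := by
  rw [PySem.Int.mod_eq_emod_of_pos hn]
  exact ⟨Int.emod_nonneg _ (by omega), Int.emod_lt_of_pos _ hn⟩

-- ===== VERDICT =====
theorem cuadrados_perfectos_spec : Claim_equal_cuadrados_perfectos := by
  intro n _ hpre
  have hn : (2:Int) ≤ n := hpre
  unfold Spec_cuadrados_perfectos cuadrados_perfectos cuadrados_perfectos_alt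
  rw [aLoop_eq_ofList]
  set SA := PySem.Set.ofList ((PySem.List.pyRange 0 n 1).map (fun r => PySem.Int.mod (r * r) n)) with hSA
  set SB := PySem.Set.ofList ((PySem.List.pyRange 0 (PySem.Int.floordiv n 2 + 1) 1).map
      (fun r => PySem.Int.mod (r * r) n)) with hSB
  set ys := (PySem.List.pyRange 0 n 1).filter (fun i => PySem.Set.contains SB i) with hys
  have hpw : ys.Pairwise (fun a b => a < b) :=
    List.Pairwise.filter _ (PySem.List.pairwise_lt_pyRange_one 0 n)
  have hmem : ∀ x, x ∈ ys ↔ x ∈ SA := by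
    intro x
    rw [hys, List.mem_filter, hSA, PySem.Set.mem_ofList, PySem.List.mem_pyRange_one]
    constructor
    · rintro ⟨hr, hc⟩
      rw [mem_iff n hn]
      simpa [hSB, PySem.Set.contains] using hc
    · intro hx
      have hx' := hx
      rw [mem_iff n hn] at hx'
      refine ⟨?_, by simpa [hSB, PySem.Set.contains] using ((PySem.Set.mem_ofList _ x).mpr hx' : x ∈ SB)⟩
      rcases List.mem_map.mp hx with ⟨r, _, hrx⟩
      have := mod_mem_range n r (by omega)
      omega
  have hperm : ys.Perm SA := by
    have hnd : ys.Nodup := List.Pairwise.imp ne_of_lt hpw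
    rw [List.perm_ext_iff_of_nodup hnd (PySem.Set.nodup_ofList _)]
    exact hmem
  exact PySem.List.sorted_eq_of_perm_of_pairwise_lt SA ys _ hperm hpw
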